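-- pv_equiv track=rewrite | github.com/Nur988/Chatbot | botui/check.py | check
-- ===== SOURCE A (Python) =====
-- def check(str,usertext,id):
--     if id+1>len(str):
--         return -1
--     else:
--         for i in str[id]:
--             if i in usertext:
--                 return id+1
--
--     return check(str,usertext,id+1)
-- ===== SOURCE B (Python) =====
-- def check(str, usertext, id):
--     # Iterative scan over the group indices instead of tail recursion.
--     for j in range(id, len(str)):
--         if any(c in usertext for c in str[j]):
--             return j + 1
--     return -1
-- ===== Notes on version B (the rewrite author's own statement) =====
-- stated objective: idiomatic
-- what changed: Replaced the tail recursion with a single for-loop over range(id, len(str)) using any() for the per-group membership scan.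
-- outside the precondition, e.g. on check(['ab'], 'x', -3): A raises IndexError, B raises IndexError
import Mathlib
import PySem

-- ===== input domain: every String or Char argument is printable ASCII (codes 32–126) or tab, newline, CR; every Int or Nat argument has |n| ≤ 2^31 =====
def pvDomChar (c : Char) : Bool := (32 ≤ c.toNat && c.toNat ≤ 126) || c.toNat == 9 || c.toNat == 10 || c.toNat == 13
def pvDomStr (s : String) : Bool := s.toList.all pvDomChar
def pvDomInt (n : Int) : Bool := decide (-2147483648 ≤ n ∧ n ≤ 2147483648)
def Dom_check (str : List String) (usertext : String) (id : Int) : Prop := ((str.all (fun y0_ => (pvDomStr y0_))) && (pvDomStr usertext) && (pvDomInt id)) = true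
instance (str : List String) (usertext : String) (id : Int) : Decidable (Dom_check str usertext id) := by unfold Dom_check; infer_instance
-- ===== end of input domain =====

-- B replaces A's tail recursion by one idiomatic for-loop over range(id, len(str)).

-- termination measure lemma for the port's recursion (cited by name in decreasing_by)
theorem check_dec (len id : Int) (h : ¬ id + 1 > len) : (len - (id + 1)).toNat < (len - id).toNat := by
  omega

-- ===== PORT A =====
-- A: recursion on id; 'for i in str[id]: if i in usertext: return id+1' is an early-exit
-- character scan ('i in usertext' for a single char = char membership, exact).
def check (str : List String) (usertext : String) (id : Int) : Int :=
  if id + 1 > (str.length : Int) then -1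
  else
    match PySem.List.pyGet? str id with
    | none => -1   -- Python raises IndexError here; excluded by Pre_check
    | some g =>
      if g.toList.any (fun c => usertext.toList.contains c) then id + 1
      else check str usertext (id + 1)
  termination_by ((str.length : Int) - id).toNat
  decreasing_by exact check_dec (str.length : Int) id (by assumption)

-- ===== PORT B =====
def check_alt (str : List String) (usertext : String) (id : Int) : Int :=
  match (PySem.List.pyRange id (str.length : Int) 1).find? (fun j =>
      match PySem.List.pyGet? str j with
      | some g => g.toList.any (fun c => usertext.toList.contains c)
      | none => false) with
  | some j => j + 1
  | none => -1

-- ===== PRECONDITION & SPEC =====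
-- Pre_ excludes exactly the inputs where A raises IndexError: id below -len(str)
-- (negative ids down to -len wrap around in Python and are kept inside Pre_).
def Pre_check (str : List String) (usertext : String) (id : Int) : Prop :=
  -(str.length : Int) ≤ id
instance (str : List String) (usertext : String) (id : Int) : Decidable (Pre_check str usertext id) := by unfold Pre_check; infer_instance

def pvWitness_check : List String × String × Int := (["ab", "cd"], "xc", 0)

def Spec_check (str : List String) (usertext : String) (id : Int) (out : Int) : Prop := out = check_alt str usertext id
instance (str : List String) (usertext : String) (id : Int) (out : Int) : Decidable (Spec_check str usertext id out) := by unfold Spec_check; infer_instance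

-- ===== CLAIM (what is proved, stated in full; the proofs are below) =====
def Claim_equal_check : Prop := ∀ (str : List String) (usertext : String) (id : Int), Dom_check str usertext id → Pre_check str usertext id → Spec_check str usertext id (check str usertext id)

-- ===== LEMMAS AND PROOFS =====

theorem check_eq_alt (str : List String) (usertext : String) (id : Int)
    (hpre : -(str.length : Int) ≤ id) : check str usertext id = check_alt str usertext id := by
  by_cases h : id + 1 > (str.length : Int)
  · rw [check.eq_def, if_pos h]
    unfold check_alt
    rw [PySem.List.pyRange_one_eq_nil (by omega)]
    rfl
  · have hlt : id < (str.length : Int) := by omega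
    have hget : ∃ g, PySem.List.pyGet? str id = some g := by
      cases hg : PySem.List.pyGet? str id with
      | none =>
        rw [PySem.List.pyGet?_eq_none_iff] at hg
        exact absurd (by constructor <;> omega) hg
      | some g => exact ⟨g, rfl⟩
    obtain ⟨g, hg⟩ := hget
    rw [check.eq_def, if_neg h, hg]
    unfold check_alt
    rw [PySem.List.pyRange_one_cons hlt]
    simp only [List.find?_cons, hg]
    cases hm : g.toList.any (fun c => usertext.toList.contains c)
    · simp only [Bool.false_eq_true, if_false]
      rw [check_eq_alt str usertext (id + 1) (by omega)]
      rfl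
    · simp
  termination_by ((str.length : Int) - id).toNat
  decreasing_by exact check_dec (str.length : Int) id h

-- ===== VERDICT (by name: the statement is the Claim_ definition above) =====
theorem check_spec : Claim_equal_check := by
  intro str usertext id _ hpre
  unfold Spec_check
  exact check_eq_alt str usertext id hpre
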